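-- pv_equiv track=rewrite | github.com/Yutotto97/ANN_CNN_project | s43b_ANN_CLA.py | best_acc_indice
-- ===== SOURCE A (Python) =====
-- def best_acc_indice(L):  #function which would find the best parameter for accuracy (sum of loss maximum)
--     a=len(L)
--     Sum_max=sum(L[0])
--     indice=0
--     for b in range (a):
--         if sum(L[b])>Sum_max:
--             indice=b
--             Sum_max=sum(L[b])
--     return(indice)
-- ===== SOURCE B (Python) =====
-- def best_acc_indice(L):
--     sums = [sum(row) for row in L]
--     return sums.index(max(sums))
-- ===== Notes on version B (the rewrite author's own statement) =====
-- stated objective: simpler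
-- what changed: Replaces the running-max scan with repeated per-row summation by a build-the-sums-table pass followed by sums.index(max(sums)); first-occurrence tie-breaking is preserved. Pre_ excludes the empty list, on which A raises IndexError (and B raises ValueError).
import Mathlib
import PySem

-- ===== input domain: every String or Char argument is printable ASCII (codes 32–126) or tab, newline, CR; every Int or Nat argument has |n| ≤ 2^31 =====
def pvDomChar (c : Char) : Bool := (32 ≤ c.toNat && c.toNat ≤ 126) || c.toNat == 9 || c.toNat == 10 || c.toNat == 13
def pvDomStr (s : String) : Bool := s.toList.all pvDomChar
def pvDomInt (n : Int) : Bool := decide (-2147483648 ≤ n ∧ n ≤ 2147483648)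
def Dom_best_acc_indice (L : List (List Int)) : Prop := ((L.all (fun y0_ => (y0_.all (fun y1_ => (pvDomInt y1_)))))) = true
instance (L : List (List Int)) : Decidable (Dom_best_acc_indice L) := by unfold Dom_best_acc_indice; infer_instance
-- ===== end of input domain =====

-- ===== PORT A =====
-- header: B builds the row-sum table once and locates the first maximum; simpler two-pass decomposition, same cost.
def best_acc_indice (L : List (List Int)) : Int :=
  let a : Int := (L.length : Int)
  let sum_max0 : Int := ((PySem.List.pyGetD L 0 []).sum)
  let st :=
    (PySem.List.pyRange 0 a 1).foldl
      (fun (st : Int × Int) (b : Int) =>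
        if (PySem.List.pyGetD L b []).sum > st.2 then
          (b, (PySem.List.pyGetD L b []).sum)
        else st)
      (0, sum_max0)
  st.1

-- ===== PORT B =====
def best_acc_indice_alt (L : List (List Int)) : Int :=
  let sums : List Int := L.map (fun row => row.sum)
  match PySem.List.max? sums (fun x => x) with
  | none => 0    -- unreachable under Pre_ (ValueError in Python B)
  | some m =>
    match PySem.List.index? sums m with
    | some k => (k : Int)
    | none => 0  -- unreachable: the maximum is a member

-- ===== PRECONDITION & SPEC =====
-- Pre_ excludes exactly the empty list, on which A raises IndexError (sum(L[0])) and B raises ValueError (max of []).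
def Pre_best_acc_indice (L : List (List Int)) : Prop := L ≠ []
instance (L : List (List Int)) : Decidable (Pre_best_acc_indice L) := by unfold Pre_best_acc_indice; infer_instance
def pvWitness_best_acc_indice : List (List Int) := [[1, 2], [3]]
def Spec_best_acc_indice (L : List (List Int)) (out : Int) : Prop := out = best_acc_indice_alt L
instance (L : List (List Int)) (out : Int) : Decidable (Spec_best_acc_indice L out) := by unfold Spec_best_acc_indice; infer_instance

-- ===== CLAIM (what is proved, stated in full; the proofs are below) =====
def Claim_equal_best_acc_indice : Prop := ∀ (L : List (List Int)), Dom_best_acc_indice L → Pre_best_acc_indice L → Spec_best_acc_indice L (best_acc_indice L)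

-- ===== LEMMAS AND PROOFS =====

-- Loop invariant for A's running-max scan: after processing range(n) the state is
-- (first index of m in the first n row sums, m) where m bounds those sums and occurs among them.
theorem best_acc_loop (L : List (List Int)) (n : Nat) (hpos : 0 < n) (hn : n ≤ L.length) :
    ∃ (m : Int) (k : Nat),
      (PySem.List.pyRange 0 (n : Int) 1).foldl
        (fun (st : Int × Int) (b : Int) =>
          if (PySem.List.pyGetD L b []).sum > st.2 then
            (b, (PySem.List.pyGetD L b []).sum)
          else st)
        (0, (PySem.List.pyGetD L 0 []).sum) = ((k : Int), m)
      ∧ PySem.List.index? ((L.map (fun r => r.sum)).take n) m = some k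
      ∧ m ∈ (L.map (fun r => r.sum)).take n
      ∧ ∀ y ∈ (L.map (fun r => r.sum)).take n, y ≤ m := by
  induction n with
  | zero => omega
  | succ n ih =>
    by_cases hn0 : n = 0
    · subst hn0
      obtain ⟨r, t, rfl⟩ : ∃ r t, L = r :: t := by
        cases L with
        | nil => simp at hn
        | cons r t => exact ⟨r, t, rfl⟩
      refine ⟨r.sum, 0, ?_, ?_, ?_, ?_⟩
      · show List.foldl _ _ (PySem.List.pyRange 0 (1 : Int) 1) = _
        rw [show PySem.List.pyRange 0 (1 : Int) 1 = [0] from by decide]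
        simp [PySem.List.pyGetD_zero_cons]
      · simp
      · simp
      · intro y hy; simp at hy; omega
    · have hnpos : 0 < n := Nat.pos_of_ne_zero hn0
      obtain ⟨m, k, hfold, hidx, hmem, hbound⟩ := ih hnpos (by omega)
      have hlen : n < L.length := by omega
      have hsplit : PySem.List.pyRange 0 ((n + 1 : Nat) : Int) 1
          = PySem.List.pyRange 0 (n : Int) 1 ++ [(n : Int)] := by
        have h := PySem.List.pyRange_one_succ_right (a := 0) (b := (n : Int)) (by positivity)
        exact_mod_cast h
      have hget : PySem.List.pyGetD L ((n : Nat) : Int) [] = L[n]'hlen := by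
        have h := PySem.List.pyGetD_eq_getElem (xs := L) (i := ((n : Nat) : Int)) (d := [])
          (by positivity) (by exact_mod_cast hlen)
        simpa using h
      have htake : (L.map (fun r => r.sum)).take (n + 1)
          = (L.map (fun r => r.sum)).take n ++ [(L[n]'hlen).sum] := by
        rw [List.take_add_one]
        congr 1
        rw [List.getElem?_eq_getElem (by simpa using hlen)]
        simp
      rw [hsplit, List.foldl_append, hfold]
      simp only [List.foldl_cons, List.foldl_nil]
      by_cases hgt : (PySem.List.pyGetD L ((n : Nat) : Int) []).sum > m
      · rw [if_pos hgt]
        rw [hget] at hgt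
        refine ⟨(L[n]'hlen).sum, n, ?_, ?_, ?_, ?_⟩
        · rw [hget]
        · rw [htake]
          have hnotmem : (L[n]'hlen).sum ∉ (L.map (fun r => r.sum)).take n := by
            intro hmem'
            exact absurd (hbound _ hmem') (by omega)
          rw [PySem.List.index?_append_singleton_self _ _ hnotmem]
          congr 1
          rw [List.length_take]
          simp
          omega
        · rw [htake]; simp
        · rw [htake]
          intro y hy
          rcases List.mem_append.mp hy with h | h
          · have := hbound _ h; omega
          · simp at h; omega
      · rw [if_neg hgt]
        rw [hget] at hgt
        refine ⟨m, k, rfl, ?_, ?_, ?_⟩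
        · rw [htake, PySem.List.index?_append_of_mem _ hmem, hidx]
        · rw [htake]; exact List.mem_append_left _ hmem
        · rw [htake]
          intro y hy
          rcases List.mem_append.mp hy with h | h
          · exact hbound _ h
          · simp at h; omega

-- ===== VERDICT (by name: the statement is the Claim_ definition above) =====
theorem best_acc_indice_spec : Claim_equal_best_acc_indice := by
  intro L _ hpre
  simp only [Spec_best_acc_indice, best_acc_indice, best_acc_indice_alt]
  obtain ⟨r, t, rfl⟩ : ∃ r t, L = r :: t := by
    cases L with
    | nil => exact absurd rfl hpre
    | cons r t => exact ⟨r, t, rfl⟩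
  obtain ⟨m, k, hfold, hidx, hmem, hbound⟩ :=
    best_acc_loop (r :: t) (r :: t).length (by simp) (le_refl _)
  have htl : (List.map (fun r => r.sum) (r :: t)).take (r :: t).length
      = List.map (fun r => r.sum) (r :: t) :=
    List.take_of_length_le (by simp)
  rw [htl] at hidx hmem hbound
  have hmax : PySem.List.max? ((r :: t).map (fun row => row.sum)) (fun x => x)
      = some ((t.map (fun row => row.sum)).foldl max r.sum) := by
    simp [PySem.List.max?_id_cons]
  set M := (t.map (fun row => row.sum)).foldl max r.sum with hM
  have hMmem : M ∈ (r :: t).map (fun row => row.sum) := PySem.List.max?_mem hmax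
  have hMmax : ∀ y ∈ (r :: t).map (fun row => row.sum), y ≤ M :=
    fun y hy => PySem.List.max?_isMax hmax y hy
  have hmM : m = M := le_antisymm (hMmax m hmem) (hbound M hMmem)
  rw [hmM] at hidx
  rw [hfold, hmax]
  simp only [PySem.List.index?_eq_idxOf?, List.map_cons] at hidx
  simp [hidx]
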